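-- pv_equiv track=rewrite | github.com/PanCodeInventory/NASH_scRNA_NK1.1 | 4_GenesetScore/geneset_scoring/scripts/run_geneset_score.py | safe_token
-- ===== SOURCE A (Python) =====
-- def safe_token(text: str) -> str:
--     keep = []
--     for ch in text.strip():
--         if ch.isalnum() or ch in ["-", "_"]:
--             keep.append(ch)
--         else:
--             keep.append("_")
--     token = "".join(keep)
--     while "__" in token:
--         token = token.replace("__", "_")
--     return token.strip("_") or "group"
-- ===== SOURCE B (Python) =====
-- def safe_token(text: str) -> str:
--     out = []
--     for ch in text.strip():
--         mapped = ch if (ch.isalnum() or ch in ("-", "_")) else "_"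
--         if not (mapped == "_" and out and out[-1] == "_"):
--             out.append(mapped)
--     return "".join(out).strip("_") or "group"
-- ===== Notes on version B (the rewrite author's own statement) =====
-- stated objective: alternative
-- what changed: Replaces A's build-then-while-loop of repeated double-underscore replacements with a single pass that collapses underscore runs inline by checking the last emitted character.
import Mathlib
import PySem

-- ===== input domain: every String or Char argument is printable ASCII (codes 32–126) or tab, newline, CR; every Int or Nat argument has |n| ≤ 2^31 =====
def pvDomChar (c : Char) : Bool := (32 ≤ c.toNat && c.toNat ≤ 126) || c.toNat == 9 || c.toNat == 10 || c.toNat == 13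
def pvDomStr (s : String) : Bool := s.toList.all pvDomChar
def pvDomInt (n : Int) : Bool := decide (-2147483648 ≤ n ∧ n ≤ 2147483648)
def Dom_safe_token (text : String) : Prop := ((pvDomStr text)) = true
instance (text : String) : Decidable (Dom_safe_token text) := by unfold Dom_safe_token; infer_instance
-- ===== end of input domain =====

-- B replaces A's build-then-while-loop of repeated double-underscore replacements by a single
-- pass that collapses underscore runs inline by checking the last emitted character (alternative decomposition).

-- ===== PORT A =====

-- one left-to-right replace pass "__" -> "_": what token.replace("__", "_") computes
-- (proved equal to PySem.Chars.replace · ['_','_'] ['_'] below, in replace_eq_rep1)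
def rep1 : List Char → List Char
  | '_' :: '_' :: t => '_' :: rep1 t
  | c :: t => c :: rep1 t
  | [] => []

theorem rep1_length_le (l : List Char) : (rep1 l).length ≤ l.length := by
  induction l using rep1.induct <;> simp [rep1] <;> omega

theorem rep1_cons (c : Char) (t : List Char) (h : ¬(c = '_' ∧ t.head? = some '_')) :
    rep1 (c :: t) = c :: rep1 t := by
  cases t with
  | nil => simp [rep1]
  | cons d t' =>
    by_cases hc : c = '_'
    · have hd : ¬ d = '_' := fun hd => h ⟨hc, by simp [hd]⟩
      subst hc; simp [rep1, hd]
    · simp [rep1, hc]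

theorem rep1_length_lt (l : List Char) (h : ['_', '_'] <:+: l) :
    (rep1 l).length < l.length := by
  induction l using rep1.induct with
  | case1 t ih =>
    have := rep1_length_le t
    simp [rep1]; omega
  | case2 c t hne ih =>
    rcases List.infix_cons_iff.mp h with hp | hi
    · exfalso
      rcases hp with ⟨s, hs⟩
      simp at hs
      exact hne s hs.1.symm hs.2.symm
    · rw [rep1_cons c t (fun ⟨hc, hh⟩ => by
        cases t with
        | nil => simp at hh
        | cons d t' => simp at hh; exact hne t' hc (by simp [hh]))]
      have := ih hi
      simp; omega
  | case3 => simp at h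

theorem replace_go_eq (fuel : Nat) : ∀ (l acc : List Char), l.length ≤ fuel →
    PySem.Chars.replace.go ['_', '_'] ['_'] fuel l acc = acc.reverse ++ rep1 l := by
  induction fuel with
  | zero =>
    intro l acc h
    have : l = [] := by cases l <;> simp_all
    subst this
    simp [PySem.Chars.replace.go, rep1]
  | succ n ih =>
    intro l acc h
    match l with
    | [] => simp [PySem.Chars.replace.go, rep1]
    | c :: t =>
      rw [PySem.Chars.replace.go]
      by_cases hp : List.isPrefixOf ['_', '_'] (c :: t) = true
      · obtain ⟨d, t', rfl⟩ : ∃ d t', t = d :: t' := by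
          cases t with
          | nil => simp [List.isPrefixOf] at hp
          | cons d t' => exact ⟨d, t', rfl⟩
        obtain ⟨rfl, rfl⟩ : c = '_' ∧ d = '_' := by
          simp [List.isPrefixOf] at hp
          exact ⟨hp.1.symm, hp.2.symm⟩
        rw [if_pos hp]
        rw [show List.drop (['_', '_'] : List Char).length ('_' :: '_' :: t') = t' from rfl]
        rw [show (['_'] : List Char).reverse ++ acc = '_' :: acc from rfl]
        rw [ih t' ('_' :: acc) (by simp at h ⊢; omega)]
        simp [rep1]
      · rw [if_neg hp]
        rw [ih t (c :: acc) (by simp at h ⊢; omega)]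
        rw [rep1_cons c t (fun ⟨hc, hh⟩ => by
          cases t with
          | nil => simp at hh
          | cons d t' =>
            simp at hh
            exact hp (by simp [List.isPrefixOf, hc, hh]))]
        simp

theorem replace_eq_rep1 (l : List Char) :
    PySem.Chars.replace l ['_', '_'] ['_'] = rep1 l := by
  rw [PySem.Chars.replace]
  simp only [List.isEmpty_cons, Bool.false_eq_true, if_false]
  exact replace_go_eq l.length l [] le_rfl

-- A's while loop: while "__" in token: token = token.replace("__", "_")
def collapseA (token : List Char) : List Char :=
  if PySem.Chars.isIn ['_', '_'] token then
    collapseA (PySem.Chars.replace token ['_', '_'] ['_'])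
  else token
termination_by token.length
decreasing_by
  rw [replace_eq_rep1]
  exact rep1_length_lt _ ((PySem.Chars.isIn_iff_infix _ _).mp (by assumption))

def safe_token (text : String) : String :=
  let keep := (PySem.Str.strip text).toList.foldl
    (fun acc ch =>
      if PySem.Str.isalnum ch || (ch == '-' || ch == '_') then acc ++ [ch] else acc ++ ['_']) []
  let token := collapseA keep
  let r := PySem.Chars.stripChars token ['_']
  if r.isEmpty then "group" else String.mk r

-- ===== PORT B =====
def safe_token_alt (text : String) : String :=
  let out := (PySem.Str.strip text).toList.foldl
    (fun acc ch =>
      let mapped := if PySem.Str.isalnum ch || (ch == '-' || ch == '_') then ch else '_'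
      if mapped == '_' && !acc.isEmpty && acc.getLast? == some '_' then acc
      else acc ++ [mapped]) []
  let r := PySem.Chars.stripChars out ['_']
  if r.isEmpty then "group" else String.mk r

-- ===== PRECONDITION & SPEC =====
def Spec_safe_token (text : String) (out : String) : Prop := out = safe_token_alt text
instance (text : String) (out : String) : Decidable (Spec_safe_token text out) := by unfold Spec_safe_token; infer_instance

-- ===== CLAIM (what is proved, stated in full; the proofs are below) =====
def Claim_equal_safe_token : Prop := ∀ (text : String), Dom_safe_token text → Spec_safe_token text (safe_token text)

-- ===== LEMMAS AND PROOFS =====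

-- canonical underscore squeeze; p = "last emitted char was '_'"
def sqz (p : Bool) : List Char → List Char
  | [] => []
  | c :: t => if c = '_' then (if p then sqz true t else '_' :: sqz true t) else c :: sqz false t

theorem sq_rep1 (l : List Char) : ∀ p, sqz p (rep1 l) = sqz p l := by
  induction l using rep1.induct with
  | case1 t ih =>
    intro p
    simp only [rep1, sqz]
    cases p <;> simp [ih]
  | case2 c t hne ih =>
    intro p
    rw [rep1_cons c t (fun ⟨hc, hh⟩ => by
      cases t with
      | nil => simp at hh
      | cons d t' => simp at hh; exact hne t' hc (by simp [hh]))]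
    by_cases hc : c = '_'
    · subst hc; simp [sqz, ih]
    · simp [sqz, hc, ih]
  | case3 => intro p; simp [rep1]

theorem sq_true_of_head_ne (l : List Char) (h : l.head? ≠ some '_') : sqz true l = sqz false l := by
  cases l with
  | nil => rfl
  | cons c t => simp at h; simp [sqz, h]

theorem sq_fix (l : List Char) (h : ¬ ['_', '_'] <:+: l) : sqz false l = l := by
  induction l with
  | nil => rfl
  | cons c t ih =>
    have ht : ¬ ['_', '_'] <:+: t := fun hh => h (List.infix_cons_iff.mpr (Or.inr hh))
    by_cases hc : c = '_'
    · subst hc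
      have hhd : t.head? ≠ some '_' := by
        intro hhd
        cases t with
        | nil => simp at hhd
        | cons d t' =>
          simp at hhd
          exact h ⟨[], t', by simp [hhd]⟩
      simp [sqz, sq_true_of_head_ne t hhd, ih ht]
    · simp [sqz, hc, ih ht]

theorem collapseA_eq_sqz (l : List Char) : collapseA l = sqz false l := by
  induction l using collapseA.induct with
  | case1 l h ih =>
    rw [collapseA, if_pos h, ih, replace_eq_rep1, sq_rep1]
  | case2 l h =>
    rw [collapseA, if_neg h, sq_fix]
    exact (PySem.Chars.isIn_eq_false_iff _ _).mp (by simpa using h)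

-- the char mapping both programs apply
def mapChar (ch : Char) : Char :=
  if PySem.Str.isalnum ch || (ch == '-' || ch == '_') then ch else '_'

theorem foldA_eq_map (cs : List Char) :
    cs.foldl (fun acc ch =>
      if PySem.Str.isalnum ch || (ch == '-' || ch == '_') then acc ++ [ch] else acc ++ ['_']) []
    = cs.map mapChar := by
  have : (fun (acc : List Char) ch =>
      if PySem.Str.isalnum ch || (ch == '-' || ch == '_') then acc ++ [ch] else acc ++ ['_'])
      = fun acc ch => acc ++ [mapChar ch] := by
    funext acc ch; unfold mapChar; split <;> rfl
  rw [this, PySem.List.foldl_append_singleton_eq_map]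
  simp

theorem foldB_eq_sqz (cs : List Char) : ∀ acc : List Char,
    cs.foldl (fun acc ch =>
      let mapped := if PySem.Str.isalnum ch || (ch == '-' || ch == '_') then ch else '_'
      if mapped == '_' && !acc.isEmpty && acc.getLast? == some '_' then acc
      else acc ++ [mapped]) acc
    = acc ++ sqz (acc.getLast? == some '_') (cs.map mapChar) := by
  show ∀ acc : List Char,
    cs.foldl (fun acc ch =>
      let mapped := mapChar ch
      if mapped == '_' && !acc.isEmpty && acc.getLast? == some '_' then acc
      else acc ++ [mapped]) acc
    = acc ++ sqz (acc.getLast? == some '_') (cs.map mapChar)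
  induction cs with
  | nil => intro acc; simp [sqz]
  | cons ch t ih =>
    intro acc
    simp only [List.foldl_cons, List.map_cons]
    by_cases hm : mapChar ch = '_'
    · by_cases hl : acc.getLast? = some '_'
      · have hne : acc.isEmpty = false := by
          cases acc with
          | nil => simp at hl
          | cons a as => rfl
        rw [if_pos (by simp [hm, hne, hl])]
        rw [ih acc]
        simp [hm, hl, sqz]
      · rw [if_neg (by simp [hl])]
        rw [ih (acc ++ [mapChar ch])]
        simp [hm, hl, sqz]
    · rw [if_neg (by simp [hm])]
      rw [ih (acc ++ [mapChar ch])]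
      rw [show ((acc ++ [mapChar ch]).getLast? == some '_') = false from by simp [hm]]
      by_cases hl : acc.getLast? = some '_' <;> simp [hm, sqz]

-- ===== VERDICT (by name: the statement is the Claim_ definition above) =====
theorem safe_token_spec : Claim_equal_safe_token := by
  intro text _
  unfold Spec_safe_token safe_token safe_token_alt
  rw [foldA_eq_map, foldB_eq_sqz _ []]
  simp [collapseA_eq_sqz]
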